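-- pv_equiv track=rewrite | github.com/kaiwensun/leetcode | 2501-3000/2732.Find a Good Subset of the Matrix.(at most two).py | goodSubsetofBinaryMatrix
-- ===== SOURCE A (Python) =====
-- from typing import List
--
-- from functools import reduce
--
-- def goodSubsetofBinaryMatrix(grid: List[List[int]]) -> List[int]:
--     bitmap = lambda row: reduce(lambda b, i_num: b | (i_num[1] << i_num[0]), enumerate(row), 0)
--     seen = {}
--     res = []
--     for i, row in enumerate(grid):
--         b = bitmap(row)
--         if b == 0:
--             return [i]
--         if b in seen:
--             continue
--         for prev, j in seen.items():
--             if prev & b == 0: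
--                 return [j, i]
--         seen[b] = i
--     return []
-- ===== SOURCE B (Python) =====
-- from typing import List
--
--
-- def goodSubsetofBinaryMatrix(grid: List[List[int]]) -> List[int]:
--     bs = []
--     for row in grid:
--         b = 0
--         for k, v in enumerate(row):
--             b |= v << k
--         bs.append(b)
--     for i, b in enumerate(bs):
--         if b == 0:
--             return [i]
--         for j in range(i):
--             if bs[j] & b == 0:
--                 return [j, i]
--     return []
-- ===== Notes on version B (the rewrite author's own statement) =====
-- stated objective: simpler
-- what changed: Replaces A's dict of first-seen bitmaps (membership skip + items() scan per row) by precomputing all row bitmaps once and scanning earlier indices of that array directly; proved to return identical values on all inputs.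
import Mathlib
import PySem

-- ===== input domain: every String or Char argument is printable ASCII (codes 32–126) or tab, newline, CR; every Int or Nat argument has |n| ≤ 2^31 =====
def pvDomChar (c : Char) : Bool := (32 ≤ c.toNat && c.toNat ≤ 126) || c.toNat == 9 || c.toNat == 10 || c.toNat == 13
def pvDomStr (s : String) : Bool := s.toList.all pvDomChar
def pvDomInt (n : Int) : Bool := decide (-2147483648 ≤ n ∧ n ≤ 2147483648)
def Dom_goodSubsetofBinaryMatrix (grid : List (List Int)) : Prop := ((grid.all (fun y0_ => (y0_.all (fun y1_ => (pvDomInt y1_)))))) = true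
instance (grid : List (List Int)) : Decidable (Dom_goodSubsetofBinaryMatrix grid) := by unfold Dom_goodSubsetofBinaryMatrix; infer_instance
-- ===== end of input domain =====

-- B replaces A's dict of first-seen bitmaps (with its membership skip and items() scan) by a
-- precomputed bitmap array searched directly over earlier indices: shorter and plainer (objective:
-- simpler); return values are proved identical on all inputs.

-- ===== PORT A =====
-- bitmap(row) = reduce(lambda b, i_num: b | (i_num[1] << i_num[0]), enumerate(row), 0)
-- (B's inner loop 'b |= v << k' over enumerate(row) is the same left fold; the helper is shared)
def pvBitmap (row : List Int) : Int :=
  (PySem.List.enumerate row).foldl (fun b p => PySem.Int.bor b (p.2 <<< p.1.toNat)) 0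

-- the 'for i, row in enumerate(grid)' loop with early returns, carrying the index and the dict
def pvGoA : List (List Int) → Int → PySem.Dict Int Int → List Int
  | [], _, _ => []
  | row :: rest, i, seen =>
    let b := pvBitmap row
    if b = 0 then [i]
    else if (seen.get? b).isSome then pvGoA rest (i + 1) seen
    else
      match seen.items.find? (fun pj => PySem.Int.band pj.1 b == 0) with
      | some pj => [pj.2, i]
      | none => pvGoA rest (i + 1) (seen.insert b i)

def goodSubsetofBinaryMatrix (grid : List (List Int)) : List Int :=
  pvGoA grid 0 PySem.Dict.empty

-- ===== PORT B =====
-- the 'for i, b in enumerate(bs)' loop; the inner 'for j in range(i): if bs[j] & b == 0' is a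
-- find? over range(i) (bs[j] via pyGet?; every j in range(i) is in range(len(bs)), so the .getD 0
-- default is never taken)
def pvGoB (bs : List Int) : List Int → Int → List Int
  | [], _ => []
  | b :: rest, i =>
    if b = 0 then [i]
    else
      match (PySem.List.pyRange 0 i 1).find?
          (fun j => PySem.Int.band ((PySem.List.pyGet? bs j).getD 0) b == 0) with
      | some j => [j, i]
      | none => pvGoB bs rest (i + 1)

def goodSubsetofBinaryMatrix_alt (grid : List (List Int)) : List Int :=
  let bs := grid.map pvBitmap
  pvGoB bs bs 0

-- ===== PRECONDITION & SPEC =====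
def Spec_goodSubsetofBinaryMatrix (grid : List (List Int)) (out : List Int) : Prop := out = goodSubsetofBinaryMatrix_alt grid
instance (grid : List (List Int)) (out : List Int) : Decidable (Spec_goodSubsetofBinaryMatrix grid out) := by unfold Spec_goodSubsetofBinaryMatrix; infer_instance

-- ===== CLAIM (what is proved, stated in full; the proofs are below) =====
def Claim_equal_goodSubsetofBinaryMatrix : Prop := ∀ (grid : List (List Int)), Dom_goodSubsetofBinaryMatrix grid → Spec_goodSubsetofBinaryMatrix grid (goodSubsetofBinaryMatrix grid)

-- ===== LEMMAS AND PROOFS =====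

-- proof-local shorthand for bs[j] (total; all uses are in range)
def pvGet (bs : List Int) (j : Nat) : Int := (bs[j]?).getD 0

-- A's dict state after the first n rows, concretely: its items list pairs each distinct bitmap of
-- bs[0..n) with the index of its first occurrence, in first-occurrence order.
def pvFirstOccs (bs : List Int) : Nat → List (Int × Int)
  | 0 => []
  | n + 1 =>
    let L := pvFirstOccs bs n
    if L.any (fun p => p.1 == pvGet bs n) then L else L ++ [(pvGet bs n, (n : Int))]

-- "no return happened in the first n rows": every bitmap nonzero, no earlier disjoint partner
def pvGood (bs : List Int) (n : Nat) : Prop :=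
  ∀ k, k < n → pvGet bs k ≠ 0 ∧ ∀ j, j < k → PySem.Int.band (pvGet bs j) (pvGet bs k) ≠ 0

theorem pvMem_firstOccs {bs : List Int} : ∀ {n : Nat} {p : Int × Int},
    p ∈ pvFirstOccs bs n → ∃ j, j < n ∧ p = (pvGet bs j, (j : Int)) := by
  intro n
  induction n with
  | zero => intro p h; simp [pvFirstOccs] at h
  | succ n ih =>
    intro p h
    simp only [pvFirstOccs] at h
    split at h
    · obtain ⟨j, hj, hp⟩ := ih h
      exact ⟨j, Nat.lt_succ_of_lt hj, hp⟩
    · rcases List.mem_append.mp h with h' | h'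
      · obtain ⟨j, hj, hp⟩ := ih h'
        exact ⟨j, Nat.lt_succ_of_lt hj, hp⟩
      · exact ⟨n, Nat.lt_succ_self n, List.mem_singleton.mp h'⟩

theorem pvKey_firstOccs {bs : List Int} {n : Nat} {c : Int}
    (h : (pvFirstOccs bs n).any (fun p => p.1 == c) = true) :
    ∃ j, j < n ∧ pvGet bs j = c := by
  obtain ⟨p, hp, hc⟩ := List.any_eq_true.mp h
  obtain ⟨j, hj, rfl⟩ := pvMem_firstOccs hp
  exact ⟨j, hj, by simpa using hc⟩

-- find? over the dict's items agrees with find? over the plain index range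
theorem pvFind_firstOccs (bs : List Int) (b : Int) : ∀ n : Nat,
    (pvFirstOccs bs n).find? (fun p => PySem.Int.band p.1 b == 0)
      = ((List.range n).find? (fun j => PySem.Int.band (pvGet bs j) b == 0)).map
          (fun j => (pvGet bs j, (j : Int))) := by
  intro n
  induction n with
  | zero => simp [pvFirstOccs]
  | succ n ih =>
    rw [List.range_succ, List.find?_append]
    simp only [pvFirstOccs]
    split
    · rename_i hkey
      rw [ih]
      cases hr : (List.range n).find? (fun j => PySem.Int.band (pvGet bs j) b == 0) with
      | some j => simp
      | none =>
        obtain ⟨j0, hj0, hc⟩ := pvKey_firstOccs hkey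
        have hnot := List.find?_eq_none.mp hr j0 (List.mem_range.mpr hj0)
        rw [hc] at hnot
        have h1 : List.find? (fun j => PySem.Int.band (pvGet bs j) b == 0) [n] = none := by
          refine List.find?_eq_none.mpr ?_
          intro x hx
          rw [List.mem_singleton.mp hx]
          exact hnot
        rw [h1]
        simp
    · rw [List.find?_append, ih]
      cases hr : (List.range n).find? (fun j => PySem.Int.band (pvGet bs j) b == 0) with
      | some j => simp
      | none =>
        simp only [Option.none_or, Option.map_none]
        rcases hpn : PySem.Int.band (pvGet bs n) b == 0 with _ | _ <;>
          simp only [List.find?_cons, List.find?_nil, hpn] <;> simp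

-- bridge: B's find? over pyRange(0, n) with pyGet? equals the find? over List.range n with pvGet
theorem pvFindB_eq (bs : List Int) (b : Int) (n : Nat) :
    (PySem.List.pyRange 0 (n : Int) 1).find?
        (fun j => PySem.Int.band ((PySem.List.pyGet? bs j).getD 0) b == 0)
      = ((List.range n).find? (fun j => PySem.Int.band (pvGet bs j) b == 0)).map
          (fun j : Nat => (j : Int)) := by
  have hrange : PySem.List.pyRange 0 (n : Int) 1 = (List.range n).map (fun k : Nat => (k : Int)) := by
    rw [PySem.List.pyRange_one]
    simp
  rw [hrange, List.find?_map]
  have hcongr : ∀ l : List Nat,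
      l.find? ((fun j => PySem.Int.band ((PySem.List.pyGet? bs j).getD 0) b == 0) ∘ (fun k : Nat => (k : Int)))
        = l.find? (fun j => PySem.Int.band (pvGet bs j) b == 0) := by
    intro l
    induction l with
    | nil => rfl
    | cons x xs ihl =>
      have hget : (PySem.List.pyGet? bs (x : Int)).getD 0 = pvGet bs x := by
        rw [PySem.List.pyGet?_natCast]; rfl
      simp only [List.find?_cons, Function.comp_apply, hget]
      split
      · rfl
      · exact ihl
  rw [hcongr (List.range n)]

-- main loop invariant: with the first n rows processed and no return yet, A's remaining loop
-- (state = first-occurrence dict) and B's remaining loop (scan over earlier indices) agree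
theorem pvLoop (bs : List Int) : ∀ (rows : List (List Int)) (n : Nat),
    bs.drop n = rows.map pvBitmap → pvGood bs n →
    pvGoA rows (n : Int) ⟨pvFirstOccs bs n⟩ = pvGoB bs (bs.drop n) (n : Int) := by
  intro rows
  induction rows with
  | nil => intro n hdrop _; rw [hdrop]; rfl
  | cons row rest ih =>
    intro n hdrop hgood
    have hn : n < bs.length := by
      by_contra hge
      rw [List.drop_eq_nil_of_le (by omega)] at hdrop
      exact absurd hdrop.symm (by simp)
    have hcons : bs.drop n = bs[n] :: bs.drop (n + 1) := List.drop_eq_getElem_cons hn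
    have hb' : bs[n] = pvBitmap row := by
      have h2 := hdrop
      rw [hcons, List.map_cons] at h2
      exact (List.cons.inj h2).1
    have hbg : pvGet bs n = pvBitmap row := by
      unfold pvGet
      rw [List.getElem?_eq_getElem hn, hb']
      rfl
    have hdrop' : bs.drop (n + 1) = rest.map pvBitmap := by
      rw [hcons] at hdrop
      simpa using congrArg List.tail hdrop
    rw [hcons, hb']
    simp only [pvGoA, pvGoB]
    by_cases hb0 : pvBitmap row = 0
    · simp only [if_pos hb0]
    · rw [if_neg hb0, if_neg hb0]
      have hcast : ((n : Int) + 1) = ((n + 1 : Nat) : Int) := by push_cast; ring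
      have hfindB := pvFindB_eq bs (pvBitmap row) n
      have hisSome : ((PySem.Dict.mk (pvFirstOccs bs n)).get? (pvBitmap row)).isSome
          = (pvFirstOccs bs n).any (fun p => p.1 == pvBitmap row) := by
        rw [← PySem.Dict.contains_eq_isSome_get?]
        rfl
      by_cases hkey : (pvFirstOccs bs n).any (fun p => p.1 == pvBitmap row) = true
      · -- skip case: the bitmap is already a key, and no earlier index is disjoint from it
        obtain ⟨j0, hj0, hj0b⟩ := pvKey_firstOccs hkey
        have hnone : ∀ j, j < n → ¬ (PySem.Int.band (pvGet bs j) (pvBitmap row) == 0) = true := by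
          intro j hj
          simp only [beq_iff_eq]
          rcases Nat.lt_trichotomy j j0 with hlt | heq | hgt
          · rw [← hj0b]; exact (hgood j0 hj0).2 j hlt
          · subst heq; rw [← hj0b, PySem.Int.band_self, hj0b]; exact hb0
          · rw [← hj0b, PySem.Int.band_comm]
            exact (hgood j hj).2 j0 hgt
        have hrfind : (List.range n).find? (fun j => PySem.Int.band (pvGet bs j) (pvBitmap row) == 0) = none :=
          List.find?_eq_none.mpr (fun j hj => hnone j (List.mem_range.mp hj))
        rw [if_pos (by rw [hisSome]; exact hkey), hfindB, hrfind]
        simp only [Option.map_none]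
        have hgood' : pvGood bs (n + 1) := by
          intro k hk
          rcases Nat.lt_or_ge k n with hk' | hk'
          · exact hgood k hk'
          · have hkn : k = n := by omega
            subst hkn
            rw [hbg]
            refine ⟨hb0, fun j hj => ?_⟩
            have := hnone j hj
            simpa using this
        have hstate : pvFirstOccs bs (n + 1) = pvFirstOccs bs n := by
          simp only [pvFirstOccs]
          rw [if_pos (by rw [hbg]; exact hkey)]
        have hrec := ih (n + 1) hdrop' hgood'
        rw [hstate] at hrec
        rw [hcast, hrec, hdrop']
      · -- fresh key: A scans the dict's items, B scans earlier indices; the finds correspond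
        rw [if_neg (by rw [hisSome]; exact hkey), pvFind_firstOccs bs (pvBitmap row) n, hfindB]
        cases hr : (List.range n).find? (fun j => PySem.Int.band (pvGet bs j) (pvBitmap row) == 0) with
        | some j => simp
        | none =>
          simp only [Option.map_none]
          have hgood' : pvGood bs (n + 1) := by
            intro k hk
            rcases Nat.lt_or_ge k n with hk' | hk'
            · exact hgood k hk'
            · have hkn : k = n := by omega
              subst hkn
              rw [hbg]
              refine ⟨hb0, fun j hj => ?_⟩
              have := List.find?_eq_none.mp hr j (List.mem_range.mpr hj)
              simpa using this
          have hstate : (PySem.Dict.mk (pvFirstOccs bs n)).insert (pvBitmap row) (n : Int)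
              = PySem.Dict.mk (pvFirstOccs bs (n + 1)) := by
            have hnc : (PySem.Dict.mk (pvFirstOccs bs n)).contains (pvBitmap row) = false := by
              have : (PySem.Dict.mk (pvFirstOccs bs n)).contains (pvBitmap row)
                  = (pvFirstOccs bs n).any (fun p => p.1 == pvBitmap row) := rfl
              rw [this]
              exact Bool.eq_false_iff.mpr hkey
            simp only [PySem.Dict.insert, hnc, Bool.false_eq_true, if_false]
            simp only [pvFirstOccs]
            rw [if_neg (by rw [hbg]; exact hkey), hbg]
          have hrec := ih (n + 1) hdrop' hgood'
          rw [hstate, hcast, hrec, hdrop']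

-- ===== VERDICT (by name: the statement is the Claim_ definition above) =====
theorem goodSubsetofBinaryMatrix_spec : Claim_equal_goodSubsetofBinaryMatrix := by
  intro grid _
  unfold Spec_goodSubsetofBinaryMatrix goodSubsetofBinaryMatrix goodSubsetofBinaryMatrix_alt
  have h := pvLoop (grid.map pvBitmap) grid 0 (by simp)
    (by intro k hk; exact absurd hk (by omega))
  simpa [PySem.Dict.empty, pvFirstOccs] using h
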